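-- pv_equiv track=rewrite | github.com/tiqwab/compiler-pl0 | rpn.py | convert_to_rpn
-- ===== SOURCE A (Python) =====
-- operators = {
--     '+': 6,
--     '-': 6,
--     '*': 7,
--     '/': 7,
-- }
--
-- def convert_to_rpn(elems):
--     '''
--     Convert a polish notation to reverse polish notation.
--
--     > convert_to_rpn(['2', '*', '(', '3', '*', '2', '+', '5', '*', '3', ')'])
--     ['2', '3', '2', '*', '5', '3', '*', '+', '*']
--     '''
--     assert elems is not None
--
--     if len(elems) == 0:
--         return []
--
--     accum = []
--     stack = []
--     while len(elems) > 0: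
--         elem = elems.pop(0)
--         if elem == '(':
--             accum = accum + convert_to_rpn(elems)
--         elif elem == ')':
--             break
--         elif elem in operators.keys():
--             while len(stack) > 0 and operators[stack[-1]] >= operators[elem]:
--                 op = stack.pop()
--                 accum.append(op)
--             stack.append(elem)
--         else:
--             accum.append(elem)
--     while len(stack) > 0:
--         op = stack.pop()
--         accum.append(op)
--     return accum
-- ===== SOURCE B (Python) =====
-- operators = {
--     '+': 6,
--     '-': 6,
--     '*': 7,
--     '/': 7,
-- }
--
-- def convert_to_rpn(elems):
--     '''Iterative shunting-yard over an explicit stack of (accum, opstack) frames.'''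
--     assert elems is not None
--     frames = []
--     accum, stack = [], []
--     while len(elems) > 0:
--         elem = elems.pop(0)
--         if elem == '(':
--             frames.append((accum, stack))
--             accum, stack = [], []
--         elif elem == ')':
--             while stack:
--                 accum.append(stack.pop())
--             if frames:
--                 paccum, pstack = frames.pop()
--                 accum = paccum + accum
--                 stack = pstack
--             else:
--                 break
--         elif elem in operators:
--             while stack and operators[stack[-1]] >= operators[elem]:
--                 accum.append(stack.pop())
--             stack.append(elem)
--         else:
--             accum.append(elem)
--     while stack:
--         accum.append(stack.pop())
--     while frames:
--         paccum, pstack = frames.pop()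
--         accum = paccum + accum
--         while pstack:
--             accum.append(pstack.pop())
--     return accum
-- ===== Notes on version B (the rewrite author's own statement) =====
-- stated objective: alternative
-- what changed: Replaced A's recursion on '(' (which relies on the callee mutating the shared elems list) by a single iterative pass driven by an explicit stack of (accum, opstack) frames; '(' pushes the current frame, ')' flushes and merges into the parent frame, end of input merges all pending frames.
import Mathlib
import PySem

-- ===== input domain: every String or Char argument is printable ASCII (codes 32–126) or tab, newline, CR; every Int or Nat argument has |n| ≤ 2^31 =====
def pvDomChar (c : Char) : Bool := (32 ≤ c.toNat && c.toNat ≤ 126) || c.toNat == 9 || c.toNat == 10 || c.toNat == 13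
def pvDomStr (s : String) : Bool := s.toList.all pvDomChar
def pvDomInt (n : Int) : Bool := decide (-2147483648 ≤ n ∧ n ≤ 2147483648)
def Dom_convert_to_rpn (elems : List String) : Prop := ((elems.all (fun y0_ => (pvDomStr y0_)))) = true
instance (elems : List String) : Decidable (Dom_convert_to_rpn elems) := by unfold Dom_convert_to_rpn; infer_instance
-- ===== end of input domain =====

-- B replaces A's recursion-with-shared-mutable-list by one iterative pass driven by an
-- explicit stack of (accum, opstack) frames (objective: alternative decomposition).
-- Both Pythons mutate `elems` via pop(0) identically; the theorems are about return values.

-- shared transliteration of the operator-precedence dict and of the identical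
-- inner `while stack and operators[stack[-1]] >= operators[elem]` loop of both Pythons
-- (operator stacks are represented top-at-head; Python's list has top-at-end)
def operatorsD : PySem.Dict String Int :=
  ((((PySem.Dict.empty).insert "+" 6).insert "-" 6).insert "*" 7).insert "/" 7

def popOps (e : String) : List String → List String × List String
  | [] => ([], [])
  | op :: rest =>
    if operatorsD.getD op 0 ≥ operatorsD.getD e 0 then
      let pr := popOps e rest
      (op :: pr.1, pr.2)
    else ([], op :: rest)

-- ===== PORT A =====
-- A's while-loop + recursive call on the (mutated) remainder; the pair's second
-- component is the list left in `elems` after the call (Python's in-place pop(0)s).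
-- The fuel argument only makes the recursion structural; with fuel ≥ elems.length
-- (as convert_to_rpn supplies) the fuel-exhaustion branch is never reached.
def goA : Nat → List String → List String → List String → List String × List String
  | _, [], accum, stack => (accum ++ stack, [])
  | 0, elems, accum, stack => (accum ++ stack, elems)
  | f + 1, e :: rest, accum, stack =>
    if e = "(" then
      let res := goA f rest [] []
      goA f res.2 (accum ++ res.1) stack
    else if e = ")" then (accum ++ stack, rest)
    else if (operatorsD.get? e).isSome then
      let pr := popOps e stack
      goA f rest (accum ++ pr.1) (e :: pr.2)
    else goA f rest (accum ++ [e]) stack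

def convert_to_rpn (elems : List String) : List String :=
  (goA elems.length elems [] []).1

-- ===== PORT B =====
-- end of input: flush the current op stack, then merge every pending frame
def finishB : List (List String × List String) → List String → List String
  | [], acc => acc
  | (pa, ps) :: fs, acc => finishB fs (pa ++ acc ++ ps)

def goB : List String → List (List String × List String) → List String → List String → List String
  | [], frames, accum, stack => finishB frames (accum ++ stack)
  | e :: rest, frames, accum, stack =>
    if e = "(" then goB rest ((accum, stack) :: frames) [] []
    else if e = ")" then
      match frames with
      | [] => accum ++ stack
      | (pa, ps) :: fs => goB rest fs (pa ++ (accum ++ stack)) ps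
    else if (operatorsD.get? e).isSome then
      let pr := popOps e stack
      goB rest frames (accum ++ pr.1) (e :: pr.2)
    else goB rest frames (accum ++ [e]) stack

def convert_to_rpn_alt (elems : List String) : List String :=
  goB elems [] [] []

-- ===== PRECONDITION & SPEC =====
def Spec_convert_to_rpn (elems : List String) (out : List String) : Prop := out = convert_to_rpn_alt elems
instance (elems : List String) (out : List String) : Decidable (Spec_convert_to_rpn elems out) := by unfold Spec_convert_to_rpn; infer_instance

-- ===== CLAIM (what is proved, stated in full; the proofs are below) =====
def Claim_equal_convert_to_rpn : Prop := ∀ (elems : List String), Dom_convert_to_rpn elems → Spec_convert_to_rpn elems (convert_to_rpn elems)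

-- ===== LEMMAS AND PROOFS =====

-- the leftover list never grows
theorem goA_snd_le : ∀ (f : Nat) (elems accum stack : List String),
    ((goA f elems accum stack).2).length ≤ elems.length := by
  intro f
  induction f with
  | zero =>
    intro elems accum stack
    cases elems <;> simp [goA]
  | succ f ih =>
    intro elems accum stack
    cases elems with
    | nil => simp [goA]
    | cons e rest =>
      by_cases h1 : e = "("
      · simp only [goA, if_pos h1]
        calc ((goA f (goA f rest [] []).2 (accum ++ (goA f rest [] []).1) stack).2).length
            ≤ ((goA f rest [] []).2).length := ih _ _ _
          _ ≤ rest.length := ih _ _ _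
          _ ≤ (e :: rest).length := by simp
      · by_cases h2 : e = ")"
        · simp [goA, h2]
        · by_cases h3 : (operatorsD.get? e).isSome
          · simp only [goA, if_neg h1, if_neg h2, if_pos h3]
            exact le_trans (ih _ _ _) (by simp)
          · simp only [goA, if_neg h1, if_neg h2, if_neg h3]
            exact le_trans (ih _ _ _) (by simp)

-- main simulation: goB with a frame stack computes goA's result, threading the leftover
theorem goB_goA : ∀ (f : Nat) (elems accum stack : List String)
    (frames : List (List String × List String)), elems.length ≤ f →
    goB elems frames accum stack =
      (match frames with
       | [] => (goA f elems accum stack).1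
       | (pa, ps) :: fs => goB (goA f elems accum stack).2 fs (pa ++ (goA f elems accum stack).1) ps) := by
  intro f
  induction f with
  | zero =>
    intro elems accum stack frames hle
    have he : elems = [] := List.eq_nil_of_length_eq_zero (Nat.le_zero.mp hle)
    subst he
    cases frames with
    | nil => simp [goB, goA, finishB]
    | cons fr fs =>
      obtain ⟨pa, ps⟩ := fr
      simp [goB, goA, finishB, List.append_assoc]
  | succ f ih =>
    intro elems accum stack frames hle
    cases elems with
    | nil =>
      cases frames with
      | nil => simp [goB, goA, finishB]
      | cons fr fs =>
        obtain ⟨pa, ps⟩ := fr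
        simp [goB, goA, finishB, List.append_assoc]
    | cons e rest =>
      have hrest : rest.length ≤ f := Nat.lt_succ_iff.mp (by simpa using hle)
      by_cases h1 : e = "("
      · have step1 := ih rest [] [] ((accum, stack) :: frames) hrest
        have hleft : ((goA f rest [] []).2).length ≤ f :=
          le_trans (goA_snd_le f rest [] []) hrest
        have step2 := ih (goA f rest [] []).2 (accum ++ (goA f rest [] []).1) stack frames hleft
        simp only [goB, goA, if_pos h1]
        rw [step1]
        exact step2
      · by_cases h2 : e = ")"
        · cases frames with
          | nil => simp [goB, goA, h2]
          | cons fr fs =>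
            obtain ⟨pa, ps⟩ := fr
            simp [goB, goA, h2]
        · by_cases h3 : (operatorsD.get? e).isSome
          · simp only [goB, goA, if_neg h1, if_neg h2, if_pos h3]
            exact ih rest (accum ++ (popOps e stack).1) (e :: (popOps e stack).2) frames hrest
          · simp only [goB, goA, if_neg h1, if_neg h2, if_neg h3]
            exact ih rest (accum ++ [e]) stack frames hrest

-- ===== VERDICT (by name: the statement is the Claim_ definition above) =====
theorem convert_to_rpn_spec : Claim_equal_convert_to_rpn := by
  intro elems _
  unfold Spec_convert_to_rpn convert_to_rpn convert_to_rpn_alt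
  exact (goB_goA elems.length elems [] [] [] (le_refl _)).symm
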